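-- pv_equiv track=rewrite | github.com/K-Y-k/Coding_Test_Python_SQL | 프로그래머스/Lv2/디펜스 게임-heapq.py | solution
-- ===== SOURCE A (Python) =====
-- from collections import deque
--
-- def solution(n, k, enemy):
--     answer = 0
--
--     enemy = deque(enemy)
--
--     for _ in range(k):
--         enemy.remove(max(enemy))
--         enemy.appendleft(0)
--
--     for i in range(len(enemy)):
--         n -= enemy[i]
--
--         if n < 0:
--             break
--         else:
--             answer += 1
--
--
--     return answer
-- ===== SOURCE B (Python) =====
-- def solution(n, k, enemy):
--     # Wipe the min(k, len(enemy)) biggest enemy waves up front, then play the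
--     # remaining rounds in one pass: a single sort instead of k remove-max scans.
--     r = min(k, len(enemy))
--     by_size = sorted(enumerate(enemy), key=lambda p: (-p[1], p[0]))
--     rounds = [0] * r + [v for _, v in sorted(by_size[r:])]
--     answer = 0
--     for cost in rounds:
--         n -= cost
--         if n < 0:
--             break
--         answer += 1
--     return answer
-- ===== Notes on version B (the rewrite author's own statement) =====
-- stated objective: faster
-- what changed: Replaces A's k passes of deque remove-max + appendleft(0) by one sort of the enumerated list that picks the min(k, len) largest enemies (ties: earliest index) and a single pass over the resulting round costs; Pre_ restricts to the natural domain of a nonnegative skill count k (A returns the plain prefix count for negative k, which B does not follow) and excludes the k>0-with-empty-list input on which A raises ValueError.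
-- outside the precondition, e.g. on solution(5, -1, [1, 2]): A returns 2, B returns 1
import Mathlib
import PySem

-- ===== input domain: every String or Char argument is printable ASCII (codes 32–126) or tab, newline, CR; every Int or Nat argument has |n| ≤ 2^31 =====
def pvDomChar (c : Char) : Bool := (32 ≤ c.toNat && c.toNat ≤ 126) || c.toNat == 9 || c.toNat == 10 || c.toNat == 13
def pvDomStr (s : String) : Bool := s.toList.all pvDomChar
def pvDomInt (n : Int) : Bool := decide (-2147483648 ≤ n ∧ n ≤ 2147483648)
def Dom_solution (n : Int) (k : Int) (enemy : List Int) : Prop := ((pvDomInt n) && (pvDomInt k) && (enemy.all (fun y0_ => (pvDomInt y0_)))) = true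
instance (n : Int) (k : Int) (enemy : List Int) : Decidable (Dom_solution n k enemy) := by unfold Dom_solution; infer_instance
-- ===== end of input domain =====

-- B replaces A's k passes of remove-max/appendleft(0) over a deque by one sort that picks the
-- min(k, len) largest enemies (ties: earliest index) and a single pass over the round costs.

-- ===== PORT A =====
-- one iteration of A's removal loop body: 'enemy.remove(max(enemy)); enemy.appendleft(0)'
def stepA (d : List Int) : List Int :=
  match PySem.List.max? d (fun x => x) with
  | none => d        -- Python raises ValueError (max of empty deque) here; excluded by Pre_
  | some v => 0 :: (PySem.List.remove? d v).getD d

-- 'for i in range(len(enemy)): n -= enemy[i]; if n < 0: break; else: answer += 1'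
def countA (n : Int) : List Int → Int
  | [] => 0
  | v :: rest => if n - v < 0 then 0 else countA (n - v) rest + 1

def solution (n : Int) (k : Int) (enemy : List Int) : Int :=
  countA n ((PySem.List.pyRange 0 k 1).foldl (fun d _ => stepA d) enemy)

-- ===== PORT B =====
-- 'for cost in rounds: n -= cost; if n < 0: break; answer += 1'
def damageLoop (n : Int) : List Int → Int
  | [] => 0
  | c :: rest => if n - c < 0 then 0 else damageLoop (n - c) rest + 1

def solution_alt (n : Int) (k : Int) (enemy : List Int) : Int :=
  let r : Int := min k (enemy.length : Int)
  let bySize := PySem.List.sorted2 (PySem.List.enumerate enemy) (fun p => -p.2) (fun p => p.1)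
  let rounds := List.replicate r.toNat 0 ++
    (PySem.List.sorted2 (PySem.List.slice bySize (some r) none) (fun p => p.1) (fun p => p.2)).map (·.2)
  damageLoop n rounds

-- ===== PRECONDITION & SPEC =====
-- Pre_ restricts k to the natural domain of a skill count (0 ≤ k; A happens to return the plain
-- prefix count for negative k, B does not follow it there) and excludes k > 0 with an empty
-- enemy list, where A raises ValueError (max of an empty deque).
def Pre_solution (n : Int) (k : Int) (enemy : List Int) : Prop := 0 ≤ k ∧ (0 < k → enemy ≠ [])
instance (n : Int) (k : Int) (enemy : List Int) : Decidable (Pre_solution n k enemy) := by unfold Pre_solution; infer_instance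
def pvWitness_solution : Int × Int × List Int := (7, 2, [4, 2, 4, 8, 1])

def Spec_solution (n : Int) (k : Int) (enemy : List Int) (out : Int) : Prop := out = solution_alt n k enemy
instance (n : Int) (k : Int) (enemy : List Int) (out : Int) : Decidable (Spec_solution n k enemy out) := by unfold Spec_solution; infer_instance

-- ===== CLAIM (what is proved, stated in full; the proofs are below) =====
def Claim_equal_solution : Prop := ∀ (n : Int) (k : Int) (enemy : List Int), Dom_solution n k enemy → Pre_solution n k enemy → Spec_solution n k enemy (solution n k enemy)

-- ===== LEMMAS AND PROOFS =====

theorem damageLoop_eq (l : List Int) (n : Int) : damageLoop n l = countA n l := by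
  induction l generalizing n with
  | nil => rfl
  | cons c t ih => simp only [damageLoop, countA, ih]

-- proof-side view of A's loop: one removal without the prepended 0, and iterated forms
def rmMax (l : List Int) : List Int :=
  match PySem.List.max? l (fun x => x) with
  | none => l
  | some v => (PySem.List.remove? l v).getD l

def iterRm : Nat → List Int → List Int
  | 0, l => l
  | s+1, l => iterRm s (rmMax l)

def iterA : Nat → List Int → List Int
  | 0, d => d
  | t+1, d => iterA t (stepA d)

-- the two sort keys of B, as single lexicographic keys
def keyLex (p : Int × Int) : Lex (Int × Int) := toLex (-p.2, p.1)

def keyIdx (p : Int × Int) : Lex (Int × Int) := toLex (p.1, p.2)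

theorem sorted2_int {α : Type} (xs : List α) (k1 k2 : α → Int) :
    PySem.List.sorted2 xs k1 k2 = PySem.List.sorted xs (fun x => toLex (k1 x, k2 x)) := by
  unfold PySem.List.sorted2 PySem.List.sorted
  simp only [if_neg Bool.false_ne_true]
  congr 1
  funext acc x
  congr 1
  funext a b
  rcases lt_trichotomy (k1 a) (k1 b) with h|h|h
  · simp only [h, not_lt.mpr (le_of_lt h)]
    simp [Prod.Lex.toLex_lt_toLex, h]
  · simp only [h, lt_irrefl]
    simp [Prod.Lex.toLex_lt_toLex]
  · simp only [h, not_lt.mpr (le_of_lt h)]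
    simp [Prod.Lex.toLex_lt_toLex, not_lt.mpr (le_of_lt h)]
    exact fun he => absurd he (ne_of_gt h)

theorem foldl_stepA (l : List Int) (d : List Int) :
    l.foldl (fun d _ => stepA d) d = iterA l.length d := by
  induction l generalizing d with
  | nil => rfl
  | cons x t ih => simpa [List.foldl, iterA] using ih (stepA d)

theorem iterA_succ_comm (t : Nat) (d : List Int) : iterA (t+1) d = stepA (iterA t d) := by
  induction t generalizing d with
  | zero => rfl
  | succ t ih => exact ih (stepA d)

theorem iterRm_succ_comm (s : Nat) (l : List Int) : iterRm (s+1) l = rmMax (iterRm s l) := by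
  induction s generalizing l with
  | zero => rfl
  | succ s ih => exact ih (rmMax l)

theorem max?_id_eq_some {l : List Int} {v : Int} (hv : v ∈ l) (hmax : ∀ y ∈ l, y ≤ v) :
    PySem.List.max? l (fun x => x) = some v := by
  cases l with
  | nil => cases hv
  | cons c T =>
    rw [PySem.List.max?_id_cons]
    congr 1
    have h1 := PySem.List.le_foldl_max T c
    have h2 := PySem.List.foldl_max_mem T c
    have hle : List.foldl max c T ≤ v := by
      rcases h2 with h | h
      · rw [h]; exact hmax c List.mem_cons_self
      · exact hmax _ (List.mem_cons_of_mem _ h)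
    have hge : v ≤ List.foldl max c T := by
      rcases List.mem_cons.mp hv with rfl | h
      · exact h1.1
      · exact h1.2 v h
    omega

theorem remove?_append_left_not_mem {v : Int} (A R : List Int) (h : v ∉ A) :
    PySem.List.remove? (A ++ R) v = (PySem.List.remove? R v).map (A ++ ·) := by
  induction A with
  | nil => simp [Option.map_id']
  | cons a t ih =>
    have ha : a ≠ v := fun he => h (he ▸ List.mem_cons_self)
    rw [List.cons_append, PySem.List.remove?_cons_of_ne _ ha,
      ih (fun hm => h (List.mem_cons_of_mem _ hm))]
    cases PySem.List.remove? R v <;> simp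

theorem rmMax_length {l : List Int} (h : l ≠ []) : (rmMax l).length = l.length - 1 := by
  unfold rmMax
  cases hm : PySem.List.max? l (fun x => x) with
  | none => exact absurd ((PySem.List.max?_eq_none_iff l _).mp hm) h
  | some v =>
    have hv : v ∈ l := PySem.List.max?_mem hm
    show ((PySem.List.remove? l v).getD l).length = l.length - 1
    rw [PySem.List.remove?_eq_some_erase l v hv]
    simp [hv]

theorem iterRm_length (e : List Int) : ∀ s : Nat, s ≤ e.length → (iterRm s e).length = e.length - s := by
  intro s
  induction s with
  | zero => simp [iterRm]
  | succ s ih =>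
    intro hs
    rw [iterRm_succ_comm]
    have hne : iterRm s e ≠ [] := by
      have := ih (by omega)
      intro hnil
      rw [hnil] at this
      simp at this
      omega
    rw [rmMax_length hne, ih (by omega)]
    omega

theorem stepA_nonempty {e : List Int} (he : e ≠ []) : stepA e = 0 :: rmMax e := by
  unfold stepA rmMax
  cases hm : PySem.List.max? e (fun x => x) with
  | none => exact absurd ((PySem.List.max?_eq_none_iff e _).mp hm) he
  | some v => rfl

theorem stepA_stable (s : Nat) (hs : 1 ≤ s) (R : List Int) (hR : ∀ x ∈ R, x ≤ 0) :
    stepA (List.replicate s 0 ++ R) = List.replicate s 0 ++ R := by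
  obtain ⟨s', rfl⟩ : ∃ s', s = s' + 1 := ⟨s - 1, by omega⟩
  rw [List.replicate_succ, List.cons_append]
  have hmax : PySem.List.max? ((0 : Int) :: (List.replicate s' 0 ++ R)) (fun x => x) = some 0 := by
    apply max?_id_eq_some List.mem_cons_self
    intro y hy
    rcases List.mem_cons.mp hy with rfl | hy
    · exact le_refl _
    · rcases List.mem_append.mp hy with hy | hy
      · simp [List.eq_of_mem_replicate hy]
      · exact hR y hy
  unfold stepA
  rw [hmax]
  show 0 :: (PySem.List.remove? (0 :: (List.replicate s' 0 ++ R)) 0).getD _ = _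
  rw [PySem.List.remove?_cons_self]
  rfl

theorem stepA_progress (s : Nat) (R : List Int) (hR : R ≠ []) (hpos : ∃ x ∈ R, 0 < x) :
    stepA (List.replicate s 0 ++ R) = List.replicate (s+1) 0 ++ rmMax R := by
  obtain ⟨x, hxR, hx⟩ := hpos
  obtain ⟨c, T, rfl⟩ : ∃ c T, R = c :: T := by
    cases R with
    | nil => exact absurd rfl hR
    | cons c T => exact ⟨c, T, rfl⟩
  have hmaxR : PySem.List.max? (c :: T) (fun x => x) = some (List.foldl max c T) :=
    PySem.List.max?_id_cons c T
  have h1 := PySem.List.le_foldl_max T c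
  have h2 := PySem.List.foldl_max_mem T c
  have hvR : List.foldl max c T ∈ c :: T := by
    rcases h2 with h | h
    · rw [h]; exact List.mem_cons_self
    · exact List.mem_cons_of_mem _ h
  have hvmax : ∀ y ∈ c :: T, y ≤ List.foldl max c T := by
    intro y hy
    rcases List.mem_cons.mp hy with rfl | hy
    · exact h1.1
    · exact h1.2 y hy
  have hvpos : 0 < List.foldl max c T := lt_of_lt_of_le hx (hvmax x hxR)
  have hmaxAll : PySem.List.max? (List.replicate s 0 ++ c :: T) (fun x => x)
      = some (List.foldl max c T) := by
    apply max?_id_eq_some (List.mem_append.mpr (Or.inr hvR))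
    intro y hy
    rcases List.mem_append.mp hy with hy | hy
    · simp [List.eq_of_mem_replicate hy]; omega
    · exact hvmax y hy
  unfold stepA
  rw [hmaxAll]
  show 0 :: (PySem.List.remove? (List.replicate s 0 ++ c :: T) (List.foldl max c T)).getD _ = _
  rw [remove?_append_left_not_mem _ _ (by intro hm; have := List.eq_of_mem_replicate hm; omega),
    PySem.List.remove?_eq_some_erase _ _ hvR]
  unfold rmMax
  rw [hmaxR]
  show _ = List.replicate (s+1) 0 ++ (PySem.List.remove? (c :: T) (List.foldl max c T)).getD (c :: T)
  rw [PySem.List.remove?_eq_some_erase _ _ hvR]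
  simp [List.replicate_succ]

theorem A_state (e : List Int) (he : e ≠ []) : ∀ t : Nat, ∃ s : Nat,
    iterA t e = List.replicate s 0 ++ iterRm s e ∧ s ≤ t ∧ s ≤ e.length ∧
    (s < t → ∀ x ∈ iterRm s e, x ≤ 0) ∧ (1 ≤ t → 1 ≤ s) := by
  intro t
  induction t with
  | zero => exact ⟨0, by simp [iterA, iterRm]⟩
  | succ t ih =>
    obtain ⟨s, hst, hs_le, hs_m, hstop, hpos⟩ := ih
    rw [iterA_succ_comm, hst]
    by_cases hlt : s < t
    · -- already stopped: all remaining nonpositive, s ≥ 1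
      have hR := hstop hlt
      have hs1 : 1 ≤ s := hpos (by omega)
      refine ⟨s, ?_, by omega, hs_m, fun _ => hR, fun _ => hs1⟩
      rw [stepA_stable s hs1 _ hR]
    · have hseq : s = t := by omega
      subst hseq
      by_cases ht0 : s = 0
      · -- t = 0: first step removes the max of e unconditionally
        subst ht0
        refine ⟨1, ?_, by omega, ?_, by omega, by omega⟩
        · show stepA (iterRm 0 e) = List.replicate 1 0 ++ iterRm 1 e
          show stepA e = List.replicate 1 0 ++ iterRm 1 e
          rw [stepA_nonempty he]
          rfl
        · cases e with
          | nil => exact absurd rfl he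
          | cons a b => simp
      · have hs1 : 1 ≤ s := by omega
        by_cases hnp : ∀ x ∈ iterRm s e, x ≤ 0
        · refine ⟨s, ?_, by omega, hs_m, fun _ => hnp, fun _ => hs1⟩
          rw [stepA_stable s hs1 _ hnp]
        · push Not at hnp
          obtain ⟨x, hxm, hx0⟩ := hnp
          have hRne : iterRm s e ≠ [] := by intro h; rw [h] at hxm; cases hxm
          refine ⟨s + 1, ?_, by omega, ?_, by omega, by omega⟩
          · rw [stepA_progress s _ hRne ⟨x, hxm, by omega⟩, iterRm_succ_comm]
          · have := iterRm_length e s hs_m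
            have : iterRm s e ≠ [] := hRne
            have hlen : 0 < (iterRm s e).length := List.length_pos_iff.mpr hRne
            have := iterRm_length e s hs_m
            omega

theorem countA_replicate (s : Nat) {n : Int} (hn : 0 ≤ n) (R : List Int) :
    countA n (List.replicate s 0 ++ R) = s + countA n R := by
  induction s with
  | zero => simp
  | succ s ih =>
    rw [List.replicate_succ, List.cons_append]
    simp only [countA]
    rw [if_neg (by omega), sub_zero, ih]
    push_cast; ring

theorem countA_neg_head (s : Nat) (hs : 1 ≤ s) {n : Int} (hn : n < 0) (R : List Int) :
    countA n (List.replicate s 0 ++ R) = 0 := by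
  cases s with
  | zero => omega
  | succ s =>
    rw [List.replicate_succ, List.cons_append]
    simp only [countA]
    rw [if_pos (by omega)]

theorem countA_allNonpos : ∀ {l : List Int} {n : Int}, 0 ≤ n → (∀ x ∈ l, x ≤ 0) →
    countA n l = l.length := by
  intro l
  induction l with
  | nil => intro n _ _; rfl
  | cons v t ih =>
    intro n hn h
    have hv : v ≤ 0 := h v List.mem_cons_self
    simp only [countA]
    rw [if_neg (by omega), ih (by omega) (fun x hx => h x (List.mem_cons_of_mem _ hx))]
    simp

theorem pairwise_strict (key : Int × Int → Lex (Int × Int))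
    (hkey : ∀ a b : Int × Int, key a = key b → a.1 = b.1) (L : List (Int × Int))
    (hpw : L.Pairwise (fun a b => key a ≤ key b)) (hnd : (L.map (·.1)).Nodup) :
    L.Pairwise (fun a b => key a < key b) := by
  have hfst : L.Pairwise (fun a b => a.1 ≠ b.1) := by
    rw [List.nodup_iff_pairwise_ne] at hnd
    exact List.pairwise_map.mp hnd
  exact (hpw.and hfst).imp (fun {a b} h =>
    lt_of_le_of_ne h.1 (fun he => h.2 (hkey a b he)))

theorem keyLex_fst (a b : Int × Int) (h : keyLex a = keyLex b) : a.1 = b.1 := by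
  unfold keyLex at h
  have := toLex.injective h
  exact (Prod.mk.injEq _ _ _ _ ▸ this).2

theorem keyIdx_fst (a b : Int × Int) (h : keyIdx a = keyIdx b) : a.1 = b.1 := by
  unfold keyIdx at h
  have := toLex.injective h
  exact (Prod.mk.injEq _ _ _ _ ▸ this).1

theorem key_step (q : Int × Int) (Q : List (Int × Int))
    (hnodup : (((q :: Q).map (·.1)).Nodup))
    (hmin : ∀ p ∈ Q, keyLex q < keyLex p) :
    rmMax ((PySem.List.sorted (q :: Q) keyIdx).map (·.2)) = (PySem.List.sorted Q keyIdx).map (·.2) := by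
  have hperm : (PySem.List.sorted (q :: Q) keyIdx).Perm (q :: Q) := PySem.List.sorted_perm _ _ _
  have hpw : (PySem.List.sorted (q :: Q) keyIdx).Pairwise (fun a b => keyIdx a ≤ keyIdx b) :=
    PySem.List.sorted_pairwise _ _
  have hndL : ((PySem.List.sorted (q :: Q) keyIdx).map (·.1)).Nodup :=
    ((hperm.map (·.1)).nodup_iff).mpr hnodup
  have hqL : q ∈ PySem.List.sorted (q :: Q) keyIdx :=
    (PySem.List.mem_sorted _ _ _ _).mpr List.mem_cons_self
  obtain ⟨L1, L2, hdec⟩ := List.append_of_mem hqL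
  rw [hdec] at hperm hpw hndL ⊢
  -- indices in L1 differ from q's
  have hfstne : ∀ p ∈ L1, p.1 ≠ q.1 := by
    intro p hp
    rw [List.map_append, List.map_cons, List.nodup_append] at hndL
    intro he
    exact hndL.2.2 p.1 (show p.1 ∈ List.map (fun x => x.1) L1 from List.mem_map_of_mem hp)
      q.1 List.mem_cons_self he
  -- elements of L1 are in Q and their value differs from q's
  have hvalne : ∀ p ∈ L1, p.2 ≠ q.2 := by
    intro p hp
    have hpL : p ∈ L1 ++ q :: L2 := List.mem_append.mpr (Or.inl hp)
    have hpQ : p ∈ Q := by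
      rcases List.mem_cons.mp (hperm.subset hpL) with he | h
      · exact absurd (congrArg Prod.fst he) (hfstne p hp)
      · exact h
    have hlex := hmin p hpQ
    have hle : keyIdx p ≤ keyIdx q := by
      rcases List.pairwise_append.mp hpw with ⟨_, _, hrel⟩
      exact hrel p hp q List.mem_cons_self
    have hplt : p.1 < q.1 := by
      unfold keyIdx at hle
      rcases lt_or_eq_of_le hle with h | h
      · rcases Prod.Lex.toLex_lt_toLex.mp h with h | h
        · exact h
        · exact absurd h.1 (hfstne p hp)
      · exact absurd (keyIdx_fst p q h) (hfstne p hp)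
    unfold keyLex at hlex
    rcases Prod.Lex.toLex_lt_toLex.mp hlex with h | h
    · intro he; simp only at h; omega
    · simp only at h; omega
  -- q.2 is the maximum of the value list, first occurring at q's position
  have hmax : PySem.List.max? ((L1 ++ q :: L2).map (·.2)) (fun x => x) = some q.2 := by
    apply max?_id_eq_some
    · exact List.mem_map_of_mem (List.mem_append.mpr (Or.inr List.mem_cons_self))
    · intro y hy
      obtain ⟨p, hpL, rfl⟩ := List.mem_map.mp hy
      rcases List.mem_cons.mp (hperm.subset hpL) with rfl | h
      · exact le_refl _
      · have := hmin p h
        unfold keyLex at this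
        rcases Prod.Lex.toLex_lt_toLex.mp this with h | h
        · simp only at h; omega
        · simp only at h; omega
  unfold rmMax
  rw [hmax]
  show (PySem.List.remove? ((L1 ++ q :: L2).map (·.2)) q.2).getD _ = _
  rw [List.map_append, List.map_cons,
    remove?_append_left_not_mem _ _ (by
      intro hm
      obtain ⟨p, hp, hpe⟩ := List.mem_map.mp hm
      exact hvalne p hp hpe),
    PySem.List.remove?_cons_self]
  have hQ : PySem.List.sorted Q keyIdx = L1 ++ L2 := by
    apply PySem.List.sorted_eq_of_perm_of_pairwise_lt
    · have h1 : (L1 ++ q :: L2).Perm (q :: (L1 ++ L2)) := List.perm_middle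
      exact (h1.symm.trans hperm).cons_inv
    · have hstrict : (L1 ++ q :: L2).Pairwise (fun a b => keyIdx a < keyIdx b) :=
        pairwise_strict keyIdx keyIdx_fst _ hpw hndL
      have hsub : (L1 ++ L2).Sublist (L1 ++ q :: L2) :=
        (List.sublist_cons_self q L2).append_left L1
      exact hstrict.sublist hsub
  rw [hQ, List.map_append]
  rfl

theorem main_lemma (e : List Int) : ∀ j : Nat, j ≤ e.length →
    ((PySem.List.sorted ((PySem.List.sorted (PySem.List.enumerate e) keyLex).drop j) keyIdx).map (·.2))
      = iterRm j e := by
  have hSlen : (PySem.List.sorted (PySem.List.enumerate e) keyLex).length = e.length := by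
    rw [PySem.List.length_sorted, PySem.List.length_enumerate]
  have hSperm : (PySem.List.sorted (PySem.List.enumerate e) keyLex).Perm (PySem.List.enumerate e) :=
    PySem.List.sorted_perm _ _ _
  have hEnd : ((PySem.List.enumerate e).map (fun x => x.1)).Nodup := by
    rw [PySem.List.map_fst_enumerate]
    exact (PySem.List.pairwise_lt_pyRange_one 0 (0 + e.length)).imp (fun h => ne_of_lt h)
  have hSnd : ((PySem.List.sorted (PySem.List.enumerate e) keyLex).map (fun x => x.1)).Nodup :=
    ((hSperm.map _).nodup_iff).mpr hEnd
  have hSstrict : (PySem.List.sorted (PySem.List.enumerate e) keyLex).Pairwise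
      (fun a b => keyLex a < keyLex b) :=
    pairwise_strict keyLex keyLex_fst _ (PySem.List.sorted_pairwise _ _) hSnd
  intro j
  induction j with
  | zero =>
    intro _
    rw [List.drop_zero, iterRm]
    have hE : PySem.List.sorted (PySem.List.sorted (PySem.List.enumerate e) keyLex) keyIdx
        = PySem.List.enumerate e := by
      apply PySem.List.sorted_eq_of_perm_of_pairwise_lt
      · exact hSperm.symm
      · have hfst : (PySem.List.enumerate e).Pairwise (fun a b => a.1 < b.1) := by
          have := PySem.List.pairwise_lt_pyRange_one 0 (0 + e.length)
          rw [← PySem.List.map_fst_enumerate e 0] at this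
          exact List.pairwise_map.mp this
        exact hfst.imp (fun h => Prod.Lex.toLex_lt_toLex.mpr (Or.inl h))
    rw [hE, PySem.List.map_snd_enumerate]
  | succ j ih =>
    intro hj
    have hjlt : j < (PySem.List.sorted (PySem.List.enumerate e) keyLex).length := by omega
    have hdrop := List.drop_eq_getElem_cons hjlt
    rw [iterRm_succ_comm, ← ih (by omega), hdrop]
    refine (key_step _ _ ?_ ?_).symm
    · have hsub : ((PySem.List.sorted (PySem.List.enumerate e) keyLex).drop j).Sublist
          (PySem.List.sorted (PySem.List.enumerate e) keyLex) := List.drop_sublist _ _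
      have := hSnd.sublist (hsub.map _)
      rw [hdrop] at this
      exact this
    · have hpwd : (((PySem.List.sorted (PySem.List.enumerate e) keyLex).drop j)).Pairwise
          (fun a b => keyLex a < keyLex b) := hSstrict.sublist (List.drop_sublist _ _)
      rw [hdrop] at hpwd
      exact (List.pairwise_cons.mp hpwd).1

theorem keyLex_eq : (fun p : Int × Int => toLex (-p.2, p.1)) = keyLex := rfl

theorem keyIdx_eq : (fun p : Int × Int => toLex (p.1, p.2)) = keyIdx := rfl

theorem solution_eq_alt (n : Int) (k : Int) (e : List Int) (hk : 0 ≤ k) (hpre : 0 < k → e ≠ []) :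
    solution n k e = solution_alt n k e := by
  unfold solution solution_alt
  rw [foldl_stepA, PySem.List.length_pyRange_one]
  simp only [sorted2_int, keyLex_eq, keyIdx_eq, damageLoop_eq]
  have hm : (0:Int) ≤ e.length := Int.natCast_nonneg _
  have hr0 : (0:Int) ≤ min k e.length := le_min hk hm
  rw [PySem.List.slice_from _ hr0]
  have hRdef : (min k (e.length:Int)).toNat = min (k-0).toNat e.length := by omega
  rw [hRdef, main_lemma e (min (k-0).toNat e.length) (by omega)]
  by_cases hk0 : 0 < k
  · have he := hpre hk0
    have hm1 : 0 < e.length := List.length_pos_iff.mpr he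
    have hK1 : 1 ≤ (k - 0).toNat := by omega
    obtain ⟨s, hst, hsK, hsm, hstop, hs1⟩ := A_state e he (k - 0).toNat
    rw [hst]
    have hs1' := hs1 hK1
    have hR1 : 1 ≤ min (k-0).toNat e.length := by omega
    by_cases hn : n < 0
    · rw [countA_neg_head s hs1' hn, countA_neg_head _ hR1 hn]
    · rw [countA_replicate s (by omega), countA_replicate _ (by omega)]
      by_cases hse : s = min (k-0).toNat e.length
      · rw [hse]
      · have hslt : s < min (k-0).toNat e.length := by omega
        have hnp : ∀ x ∈ iterRm s e, x ≤ 0 := hstop (by omega)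
        have hnpR : ∀ x ∈ iterRm (min (k-0).toNat e.length) e, x ≤ 0 := by
          intro x hx
          rw [← main_lemma e _ (by omega)] at hx
          obtain ⟨p, hp, rfl⟩ := List.mem_map.mp hx
          rw [PySem.List.mem_sorted] at hp
          have hp2 : p ∈ (PySem.List.sorted (PySem.List.enumerate e) keyLex).drop s := by
            have hdd : (PySem.List.sorted (PySem.List.enumerate e) keyLex).drop
                (min (k - 0).toNat e.length)
                = ((PySem.List.sorted (PySem.List.enumerate e) keyLex).drop s).drop
                  (min (k - 0).toNat e.length - s) := by
              rw [List.drop_drop]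
              congr 1
              omega
            rw [hdd] at hp
            exact List.drop_subset _ _ hp
          apply hnp
          rw [← main_lemma e s (by omega)]
          exact List.mem_map.mpr ⟨p, (PySem.List.mem_sorted _ _ _ _).mpr hp2, rfl⟩
        rw [countA_allNonpos (by omega) hnp, countA_allNonpos (by omega) hnpR,
          iterRm_length e s (by omega), iterRm_length e _ (by omega)]
        omega
  · have hk0' : (k - 0).toNat = 0 := by omega
    have hk00 : k = 0 := by omega
    rw [hk0']
    simp only [Nat.zero_min]
    rfl

-- ===== VERDICT (by name: the statement is the Claim_ definition above) =====
theorem solution_spec : Claim_equal_solution := by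
  intro n k enemy _ hpre
  show solution n k enemy = solution_alt n k enemy
  exact solution_eq_alt n k enemy hpre.1 hpre.2
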